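-- pv_equiv track=rewrite | github.com/Dongmin88/codetest2 | test4.py | solution
-- ===== SOURCE A (Python) =====
-- def solution(total_sp, skills):
--     # 노드 개수 파악
--     max_node = 0
--     for skill in skills:
--         max_node = max(max_node, skill[0], skill[1])
--
--     # 부모-자식 관계 생성
--     children = [[] for _ in range(max_node + 1)]
--     parents = [0] * (max_node + 1)
--
--     for skill in skills:
--         parent, child = skill[0], skill[1]
--         children[parent].append(child)
--         parents[child] = parent
--
--     # 루트 노드와 리프 노드 찾기
--     root = 1  # 문제에서 1번 노드가 루트
--     leaves = []
--     for i in range(1, max_node + 1):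
--         if not children[i]:
--             leaves.append(i)
--
--     # 각 리프 노드별 필요한 최소값 찾기
--     def find_min_leaf_value():
--         left, right = 1, total_sp
--
--         while left < right:
--             mid = (left + right + 1) // 2
--
--             # 각 리프에 mid 값을 할당했을 때 가능한지 확인
--             leaf_values = [mid] * len(leaves)
--             node_values = [0] * (max_node + 1)
--
--             # 리프 노드에 값 할당
--             for i, leaf in enumerate(leaves):
--                 node_values[leaf] = leaf_values[i]
--
--             # 상향식으로 부모 노드 값 계산
--             valid = True
--             total = sum(leaf_values)
--
--             # 리프가 아닌 노드들의 값 계산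
--             non_leaves = set(range(1, max_node + 1)) - set(leaves)
--             for node in sorted(non_leaves, reverse=True):
--                 if children[node]:
--                     node_values[node] = sum(node_values[child] for child in children[node])
--                     total += node_values[node]
--
--             if total <= total_sp:
--                 left = mid
--             else:
--                 right = mid - 1
--
--         return left
--
--     # 최적의 리프 노드 값 찾기
--     leaf_value = find_min_leaf_value()
--
--     # 결과 배열 생성
--     result = [0] * (max_node + 1)
--     for leaf in leaves:
--         result[leaf] = leaf_value
--
--     # 나머지 노드 값 계산
--     non_leaves = set(range(1, max_node + 1)) - set(leaves)
--     for node in sorted(non_leaves, reverse=True):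
--         if children[node]:
--             result[node] = sum(result[child] for child in children[node])
--
--     return result[1:]  # 0번 인덱스 제외하고 반환
-- ===== SOURCE B (Python) =====
-- def solution(total_sp, skills):
--     max_node = 0
--     for skill in skills:
--         max_node = max(max_node, skill[0], skill[1])
--     children = [[] for _ in range(max_node + 1)]
--     for skill in skills:
--         children[skill[0]].append(skill[1])
--     # everything is linear in the common leaf value: compute the profile for
--     # leaf value 1 and its total cost, then scale by the best affordable factor
--     unit = [0] * (max_node + 1)
--     cost = 0
--     for i in range(1, max_node + 1):
--         if not children[i]:
--             unit[i] = 1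
--             cost += 1
--     for node in range(max_node, 0, -1):
--         if children[node]:
--             unit[node] = sum(unit[c] for c in children[node])
--             cost += unit[node]
--     leaf_value = max(1, total_sp // cost) if total_sp > 1 and cost > 0 else 1
--     return [v * leaf_value for v in unit[1:]]
-- ===== Notes on version B (the rewrite author's own statement) =====
-- stated objective: faster
-- what changed: Removes the binary search that re-runs the whole bottom-up tree evaluation (plus set difference and sort) for every probe value: the cost is linear in the common leaf value, so B does ONE bottom-up pass with leaf value 1, gets the coefficient C, and returns the unit profile scaled by max(1, total_sp // C).
import Mathlib
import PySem

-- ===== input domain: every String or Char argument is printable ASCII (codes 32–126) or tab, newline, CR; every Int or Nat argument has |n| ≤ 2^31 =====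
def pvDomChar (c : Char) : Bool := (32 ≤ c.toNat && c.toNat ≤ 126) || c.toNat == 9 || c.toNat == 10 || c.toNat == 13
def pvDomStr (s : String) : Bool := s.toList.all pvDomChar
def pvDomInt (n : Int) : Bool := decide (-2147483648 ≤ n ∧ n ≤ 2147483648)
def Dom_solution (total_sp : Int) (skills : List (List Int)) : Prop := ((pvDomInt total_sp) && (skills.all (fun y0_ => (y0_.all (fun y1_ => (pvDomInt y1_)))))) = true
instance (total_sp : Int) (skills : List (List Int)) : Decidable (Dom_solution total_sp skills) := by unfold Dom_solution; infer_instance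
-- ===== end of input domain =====

-- B replaces A's binary search (which re-runs the whole bottom-up tree evaluation per probe)
-- by one bottom-up pass at leaf value 1 and a closed-form scaling — objective: faster.

-- ===== PORT A =====
-- max_node = max(max_node, skill[0], skill[1]) over all skills (B's Python computes it the same way)
def pvMaxNode (skills : List (List Int)) : Int :=
  skills.foldl (fun m s => max (max m (PySem.List.pyGetD s 0 0)) (PySem.List.pyGetD s 1 0)) 0

-- children/parents build: children[parent].append(child); parents[child] = parent
def aBuild (n : Int) (skills : List (List Int)) : List (List Int) × List Int :=
  skills.foldl
    (fun cp s =>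
      (PySem.List.pySetD cp.1 (PySem.List.pyGetD s 0 0)
        (PySem.List.pyGetD cp.1 (PySem.List.pyGetD s 0 0) [] ++ [PySem.List.pyGetD s 1 0]),
       PySem.List.pySetD cp.2 (PySem.List.pyGetD s 1 0) (PySem.List.pyGetD s 0 0)))
    (List.replicate (n + 1).toNat ([] : List Int), List.replicate (n + 1).toNat (0 : Int))

-- for i in range(1, max_node+1): if not children[i]: leaves.append(i)
def aLeaves (children : List (List Int)) (n : Int) : List Int :=
  (PySem.List.pyRange 1 (n + 1) 1).foldl
    (fun acc i => if PySem.List.pyGetD children i [] = [] then acc ++ [i] else acc) []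

-- sum(node_values[child] for child in cs)
def aSumChildren (nv : List Int) (cs : List Int) : Int :=
  cs.foldl (fun acc c => acc + PySem.List.pyGetD nv c 0) 0

-- sorted(set(range(1, max_node+1)) - set(leaves), reverse=True)
def aNonLeavesDesc (leaves : List Int) (n : Int) : List Int :=
  PySem.List.sorted
    (PySem.Set.diff (PySem.Set.ofList (PySem.List.pyRange 1 (n + 1) 1)) (PySem.Set.ofList leaves))
    (fun x => x) true

-- one feasibility probe of find_min_leaf_value: the final 'total' for a given mid
def aTotal (children : List (List Int)) (leaves : List Int) (n mid : Int) : Int :=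
  let leafValues := PySem.List.pyRepeat [mid] (leaves.length : Int)
  let nv1 := (PySem.List.enumerate leaves).foldl
      (fun nv p => PySem.List.pySetD nv p.2 (PySem.List.pyGetD leafValues p.1 0))
      (List.replicate (n + 1).toNat (0 : Int))
  let st := (aNonLeavesDesc leaves n).foldl
      (fun (st : List Int × Int) node =>
        if PySem.List.pyGetD children node [] ≠ [] then
          (PySem.List.pySetD st.1 node (aSumChildren st.1 (PySem.List.pyGetD children node [])),
           st.2 + aSumChildren st.1 (PySem.List.pyGetD children node []))
        else st)
      (nv1, leafValues.sum)
  st.2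

-- while left < right: mid = (left+right+1)//2; if total <= total_sp: left = mid else right = mid-1
def aLoop (children : List (List Int)) (leaves : List Int) (n total_sp l r : Int) : Int :=
  if h : l < r then
    if aTotal children leaves n (PySem.Int.floordiv (l + r + 1) 2) ≤ total_sp then
      aLoop children leaves n total_sp (PySem.Int.floordiv (l + r + 1) 2) r
    else
      aLoop children leaves n total_sp l (PySem.Int.floordiv (l + r + 1) 2 - 1)
  else l
termination_by (r - l).toNat
decreasing_by
  · have hb := PySem.Int.floordiv_two_mid_bounds (lo := l + 1) (hi := r) (by omega)
    have he : l + 1 + r = l + r + 1 := by ring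
    rw [he] at hb
    omega
  · have hb := PySem.Int.floordiv_two_mid_bounds (lo := l + 1) (hi := r) (by omega)
    have he : l + 1 + r = l + r + 1 := by ring
    rw [he] at hb
    omega

def solution (total_sp : Int) (skills : List (List Int)) : List Int :=
  let n := pvMaxNode skills
  let children := (aBuild n skills).1
  let leaves := aLeaves children n
  let leafValue := aLoop children leaves n total_sp 1 total_sp
  let result1 := leaves.foldl (fun r leaf => PySem.List.pySetD r leaf leafValue)
      (List.replicate (n + 1).toNat (0 : Int))
  let result := (aNonLeavesDesc leaves n).foldl
      (fun r node =>
        if PySem.List.pyGetD children node [] ≠ [] then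
          PySem.List.pySetD r node (aSumChildren r (PySem.List.pyGetD children node []))
        else r)
      result1
  PySem.List.slice result (some 1) none

-- ===== PORT B =====
def bChildren (n : Int) (skills : List (List Int)) : List (List Int) :=
  skills.foldl
    (fun c s =>
      PySem.List.pySetD c (PySem.List.pyGetD s 0 0)
        (PySem.List.pyGetD c (PySem.List.pyGetD s 0 0) [] ++ [PySem.List.pyGetD s 1 0]))
    (List.replicate (n + 1).toNat ([] : List Int))

-- for i in range(1, max_node+1): if not children[i]: unit[i] = 1; cost += 1
def bInit (children : List (List Int)) (n : Int) : List Int × Int :=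
  (PySem.List.pyRange 1 (n + 1) 1).foldl
    (fun uc i =>
      if PySem.List.pyGetD children i [] = [] then (PySem.List.pySetD uc.1 i 1, uc.2 + 1) else uc)
    (List.replicate (n + 1).toNat (0 : Int), 0)

-- for node in range(max_node, 0, -1): if children[node]: unit[node] = sum(...); cost += unit[node]
def bDown (children : List (List Int)) (n : Int) (st : List Int × Int) : List Int × Int :=
  (PySem.List.pyRange n 0 (-1)).foldl
    (fun uc node =>
      if PySem.List.pyGetD children node [] ≠ [] then
        ((PySem.List.pySetD uc.1 node
            ((PySem.List.pyGetD children node []).foldl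
              (fun a c => a + PySem.List.pyGetD uc.1 c 0) 0)),
         uc.2 + (PySem.List.pyGetD children node []).foldl
              (fun a c => a + PySem.List.pyGetD uc.1 c 0) 0)
      else uc)
    st

def solution_alt (total_sp : Int) (skills : List (List Int)) : List Int :=
  let n := pvMaxNode skills
  let children := bChildren n skills
  let st := bDown children n (bInit children n)
  let leafValue :=
    if total_sp > 1 ∧ st.2 > 0 then max 1 (PySem.Int.floordiv total_sp st.2) else 1
  (PySem.List.slice st.1 (some 1) none).map (fun v => v * leafValue)

-- ===== PRECONDITION & SPEC =====
-- Pre_ excludes exactly the inputs on which the Python A raises IndexError: a skill entry of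
-- fewer than two elements, or a node id so negative that even Python's negative-index wrap
-- puts it out of range of the (max_node+1)-sized arrays.
def Pre_solution (total_sp : Int) (skills : List (List Int)) : Prop :=
  ∀ s ∈ skills, 2 ≤ s.length ∧
    -(pvMaxNode skills + 1) ≤ PySem.List.pyGetD s 0 0 ∧
    -(pvMaxNode skills + 1) ≤ PySem.List.pyGetD s 1 0
instance (total_sp : Int) (skills : List (List Int)) : Decidable (Pre_solution total_sp skills) := by
  unfold Pre_solution; infer_instance

def pvWitness_solution : Int × List (List Int) := (10, [[1, 2], [1, 3]])

def Spec_solution (total_sp : Int) (skills : List (List Int)) (out : List Int) : Prop :=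
  out = solution_alt total_sp skills
instance (total_sp : Int) (skills : List (List Int)) (out : List Int) :
    Decidable (Spec_solution total_sp skills out) := by unfold Spec_solution; infer_instance

-- ===== CLAIM (what is proved, stated in full; the proofs are below) =====
def Claim_equal_solution : Prop := ∀ (total_sp : Int) (skills : List (List Int)),
  Dom_solution total_sp skills → Pre_solution total_sp skills →
  Spec_solution total_sp skills (solution total_sp skills)

-- ===== LEMMAS AND PROOFS =====

-- the common loop body of the bottom-up pass (A's inner pass and B's bDown have this body)
def passF (children : List (List Int)) : List Int × Int → Int → List Int × Int :=
  fun uc node =>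
    if PySem.List.pyGetD children node [] ≠ [] then
      (PySem.List.pySetD uc.1 node
          ((PySem.List.pyGetD children node []).foldl
            (fun a c => a + PySem.List.pyGetD uc.1 c 0) 0),
       uc.2 + (PySem.List.pyGetD children node []).foldl
            (fun a c => a + PySem.List.pyGetD uc.1 c 0) 0)
    else uc

def hasCh (children : List (List Int)) (i : Int) : Bool :=
  !decide (PySem.List.pyGetD children i [] = [])

theorem build_fst (n : Int) (skills : List (List Int)) :
    (aBuild n skills).1 = bChildren n skills := by
  unfold aBuild bChildren
  rw [PySem.List.foldl_prod_mk
    (f := fun c s => PySem.List.pySetD c (PySem.List.pyGetD s 0 0)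
        (PySem.List.pyGetD c (PySem.List.pyGetD s 0 0) [] ++ [PySem.List.pyGetD s 1 0]))
    (g := fun p s => PySem.List.pySetD p (PySem.List.pyGetD s 1 0) (PySem.List.pyGetD s 0 0))]

theorem leaves_eq (children : List (List Int)) (n : Int) :
    aLeaves children n
      = (PySem.List.pyRange 1 (n + 1) 1).filter (fun i => !hasCh children i) := by
  unfold aLeaves
  rw [show (fun (acc : List Int) i =>
      if PySem.List.pyGetD children i [] = [] then acc ++ [i] else acc)
      = (fun (acc : List Int) x =>
          if (!hasCh children x) = true then acc ++ [(fun i : Int => i) x] else acc) from by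
    funext acc i
    by_cases hc : PySem.List.pyGetD children i [] = [] <;> simp [hasCh, hc]]
  rw [PySem.List.foldl_append_if]
  simp

theorem pySetD_map (f : Int → Int) (xs : List Int) (i v : Int) :
    (PySem.List.pySetD xs i v).map f = PySem.List.pySetD (xs.map f) i (f v) := by
  unfold PySem.List.pySetD PySem.List.pySet?
  cases h : PySem.List.pyIdx? xs.length i <;>
    simp [h, List.length_map, List.map_set]

theorem mem_pySetD (xs : List Int) (i v x : Int) (h : x ∈ PySem.List.pySetD xs i v) :
    x ∈ xs ∨ x = v := by
  unfold PySem.List.pySetD PySem.List.pySet? at h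
  cases hi : PySem.List.pyIdx? xs.length i <;> rw [hi] at h
  · exact Or.inl h
  · simpa using List.mem_or_eq_of_mem_set h

theorem pyGetD_scale (m : Int) (xs : List Int) (c : Int) :
    PySem.List.pyGetD (xs.map (· * m)) c 0 = PySem.List.pyGetD xs c 0 * m := by
  have h := PySem.List.pyGetD_map (fun x => x * m) xs c 0
  simpa [zero_mul] using h

theorem sum_fold_scale (st : List Int) (m : Int) :
    ∀ (cs : List Int) (a : Int),
      cs.foldl (fun a c => a + PySem.List.pyGetD (st.map (· * m)) c 0) (a * m)
        = cs.foldl (fun a c => a + PySem.List.pyGetD st c 0) a * m := by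
  intro cs
  induction cs with
  | nil => intro a; rfl
  | cons c cs ih =>
    intro a
    rw [List.foldl_cons, List.foldl_cons,
      show a * m + PySem.List.pyGetD (st.map (· * m)) c 0
        = (a + PySem.List.pyGetD st c 0) * m by rw [pyGetD_scale, add_mul]]
    exact ih (a + PySem.List.pyGetD st c 0)

theorem pass_scale (children : List (List Int)) (m : Int) :
    ∀ (order : List Int) (st : List Int) (t : Int),
      order.foldl (passF children) (st.map (· * m), t * m)
        = ((order.foldl (passF children) (st, t)).1.map (· * m),
           (order.foldl (passF children) (st, t)).2 * m) := by
  intro order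
  induction order with
  | nil => intro st t; rfl
  | cons node order ih =>
    intro st t
    simp only [List.foldl_cons, passF]
    by_cases hc : PySem.List.pyGetD children node [] = []
    · simp only [hc, ne_eq, not_true_eq_false, if_false]
      exact ih st t
    · simp only [hc, ne_eq, not_false_eq_true, if_true]
      have hsum : (PySem.List.pyGetD children node []).foldl
          (fun a c => a + PySem.List.pyGetD (st.map (· * m)) c 0) 0
          = (PySem.List.pyGetD children node []).foldl
              (fun a c => a + PySem.List.pyGetD st c 0) 0 * m := by
        have := sum_fold_scale st m (PySem.List.pyGetD children node []) 0
        simpa [zero_mul] using this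
      rw [hsum, ← pySetD_map, ← add_mul]
      exact ih _ _

theorem pass_filter (children : List (List Int)) :
    ∀ (order : List Int) (st : List Int × Int),
      order.foldl (passF children) st
        = (order.filter (hasCh children)).foldl (passF children) st := by
  intro order
  induction order with
  | nil => intro st; rfl
  | cons node order ih =>
    intro st
    by_cases hc : PySem.List.pyGetD children node [] = []
    · have hskip : passF children st node = st := by simp [passF, hc]
      simp [List.filter_cons, hasCh, hc, hskip, ih]
    · simp [List.filter_cons, hasCh, hc, ih]

theorem orderA_eq (children : List (List Int)) (n : Int) :
    aNonLeavesDesc ((PySem.List.pyRange 1 (n + 1) 1).filter (fun i => !hasCh children i)) n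
      = ((PySem.List.pyRange 1 (n + 1) 1).filter (hasCh children)).reverse := by
  unfold aNonLeavesDesc
  rw [PySem.Set.ofList_eq_self_of_nodup _ (PySem.List.nodup_pyRange_one 1 (n + 1))]
  have hdiff : PySem.Set.diff (PySem.List.pyRange 1 (n + 1) 1)
      (PySem.Set.ofList ((PySem.List.pyRange 1 (n + 1) 1).filter (fun i => !hasCh children i)))
      = (PySem.List.pyRange 1 (n + 1) 1).filter (hasCh children) := by
    show (PySem.List.pyRange 1 (n + 1) 1).filter _ = _
    apply List.filter_congr
    intro x hx
    have : (x ∈ PySem.Set.ofList ((PySem.List.pyRange 1 (n + 1) 1).filter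
        (fun i => !hasCh children i))) ↔ (!hasCh children x) = true := by
      rw [PySem.Set.mem_ofList]
      simp [List.mem_filter, hx]
    by_cases hh : hasCh children x <;> simp_all
  rw [hdiff]
  apply PySem.List.sorted_rev_eq_of_perm_of_pairwise_gt
  · exact (List.reverse_perm _)
  · rw [List.pairwise_reverse]
    exact (PySem.List.pairwise_lt_pyRange_one 1 (n + 1)).sublist List.filter_sublist

theorem init_scale (m : Int) :
    ∀ (ls : List Int) (st : List Int),
      ls.foldl (fun nv l => PySem.List.pySetD nv l m) (st.map (· * m))
        = (ls.foldl (fun nv l => PySem.List.pySetD nv l 1) st).map (· * m) := by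
  intro ls
  induction ls with
  | nil => intro st; rfl
  | cons l ls ih =>
    intro st
    rw [List.foldl_cons, List.foldl_cons]
    have h := pySetD_map (fun x => x * m) st l 1
    rw [one_mul] at h
    rw [← h, ih]

theorem initA_gen (m : Int) (K' : Nat) :
    ∀ (ls : List Int) (k : Nat) (nv : List Int), k + ls.length ≤ K' →
      (PySem.List.enumerate ls (k : Int)).foldl
          (fun nv p => PySem.List.pySetD nv p.2
            (PySem.List.pyGetD (List.replicate K' m) p.1 0)) nv
        = ls.foldl (fun nv l => PySem.List.pySetD nv l m) nv := by
  intro ls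
  induction ls with
  | nil => intro k nv _; rfl
  | cons x ls ih =>
    intro k nv hk
    rw [PySem.List.enumerate_cons]
    simp only [List.foldl_cons]
    have hk' : k < K' := by simp only [List.length_cons] at hk; omega
    have hget : PySem.List.pyGetD (List.replicate K' m) (k : Int) 0 = m := by
      rw [PySem.List.pyGetD_natCast]
      simp only [List.getD, List.getElem?_replicate]
      rw [if_pos hk']
      rfl
    rw [hget]
    have hcast : ((k : Int) + 1) = ((k + 1 : Nat) : Int) := by push_cast; ring
    rw [hcast, ih (k + 1) _ (by simp only [List.length_cons] at hk; omega)]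

theorem pyGetD_replicate_zero (K : Nat) (c : Int) :
    PySem.List.pyGetD (List.replicate K (0 : Int)) c 0 = 0 := by
  unfold PySem.List.pyGetD
  cases h : PySem.List.pyGet? (List.replicate K (0 : Int)) c
  · rfl
  · have := PySem.List.mem_of_pyGet?_eq_some _ h
    simp_all [List.eq_of_mem_replicate this]

theorem pySetD_replicate_zero (K : Nat) (i : Int) :
    PySem.List.pySetD (List.replicate K (0 : Int)) i 0 = List.replicate K 0 := by
  unfold PySem.List.pySetD PySem.List.pySet?
  cases h : PySem.List.pyIdx? (List.replicate K (0 : Int)).length i <;>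
    simp [h, List.set_replicate_self]

theorem zero_pass (children : List (List Int)) (K : Nat) :
    ∀ (order : List Int) (t : Int),
      order.foldl (passF children) (List.replicate K (0 : Int), t)
        = (List.replicate K (0 : Int), t) := by
  intro order
  induction order with
  | nil => intro t; rfl
  | cons node order ih =>
    intro t
    simp only [List.foldl_cons, passF]
    have hsum : ∀ (cs : List Int),
        cs.foldl (fun a c => a + PySem.List.pyGetD (List.replicate K (0 : Int)) c 0) 0 = 0 := by
      intro cs
      simp only [pyGetD_replicate_zero, add_zero]
      exact PySem.List.foldl_ignore cs 0
    by_cases hc : PySem.List.pyGetD children node [] = []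
    · simp only [hc, ne_eq, not_true_eq_false, if_false]; exact ih t
    · simp only [hc, ne_eq, not_false_eq_true, if_true, hsum, pySetD_replicate_zero, add_zero]
      exact ih t

theorem pyGetD_nonneg_of (st : List Int) (h : ∀ x ∈ st, 0 ≤ x) (c : Int) :
    0 ≤ PySem.List.pyGetD st c 0 := by
  unfold PySem.List.pyGetD
  cases hg : PySem.List.pyGet? st c
  · simp
  · simpa using h _ (PySem.List.mem_of_pyGet?_eq_some _ hg)

theorem sum_fold_nonneg (st : List Int) (h : ∀ x ∈ st, 0 ≤ x) :
    ∀ (cs : List Int) (a : Int), 0 ≤ a →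
      0 ≤ cs.foldl (fun a c => a + PySem.List.pyGetD st c 0) a := by
  intro cs
  induction cs with
  | nil => intro a ha; simpa using ha
  | cons c cs ih =>
    intro a ha
    simp only [List.foldl_cons]
    exact ih _ (add_nonneg ha (pyGetD_nonneg_of st h c))

theorem pass_nonneg (children : List (List Int)) :
    ∀ (order : List Int) (st : List Int × Int), (∀ x ∈ st.1, 0 ≤ x) →
      st.2 ≤ (order.foldl (passF children) st).2 ∧
      (∀ x ∈ (order.foldl (passF children) st).1, 0 ≤ x) := by
  intro order
  induction order with
  | nil => intro st h; exact ⟨le_refl _, h⟩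
  | cons node order ih =>
    intro st h
    simp only [List.foldl_cons, passF]
    by_cases hc : PySem.List.pyGetD children node [] = []
    · simp only [hc, ne_eq, not_true_eq_false, if_false]
      exact ih st h
    · simp only [hc, ne_eq, not_false_eq_true, if_true]
      have hv : 0 ≤ (PySem.List.pyGetD children node []).foldl
          (fun a c => a + PySem.List.pyGetD st.1 c 0) 0 :=
        sum_fold_nonneg st.1 h _ 0 (le_refl 0)
      have hmem : ∀ x ∈ PySem.List.pySetD st.1 node
          ((PySem.List.pyGetD children node []).foldl
            (fun a c => a + PySem.List.pyGetD st.1 c 0) 0), 0 ≤ x := by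
        intro x hx
        rcases mem_pySetD _ _ _ _ hx with hx' | hx'
        · exact h x hx'
        · rw [hx']; exact hv
      have := ih (PySem.List.pySetD st.1 node
          ((PySem.List.pyGetD children node []).foldl
            (fun a c => a + PySem.List.pyGetD st.1 c 0) 0),
        st.2 + (PySem.List.pyGetD children node []).foldl
            (fun a c => a + PySem.List.pyGetD st.1 c 0) 0) hmem
      exact ⟨le_trans (by omega) this.1, this.2⟩

theorem init1_nonneg :
    ∀ (ls : List Int) (st : List Int), (∀ x ∈ st, 0 ≤ x) →
      ∀ x ∈ ls.foldl (fun nv l => PySem.List.pySetD nv l 1) st, 0 ≤ x := by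
  intro ls
  induction ls with
  | nil => intro st h; exact h
  | cons l ls ih =>
    intro st h
    simp only [List.foldl_cons]
    apply ih
    intro x hx
    rcases mem_pySetD _ _ _ _ hx with hx' | hx'
    · exact h x hx'
    · rw [hx']; omega

theorem initB_gen (children : List (List Int)) :
    ∀ (l : List Int) (u : List Int) (c : Int),
      l.foldl (fun uc i =>
          if PySem.List.pyGetD children i [] = [] then (PySem.List.pySetD uc.1 i 1, uc.2 + 1)
          else uc) (u, c)
        = ((l.filter (fun i => !hasCh children i)).foldl
            (fun u i => PySem.List.pySetD u i 1) u,
           c + ((l.filter (fun i => !hasCh children i)).length : Int)) := by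
  intro l
  induction l with
  | nil => intro u c; simp
  | cons i l ih =>
    intro u c
    by_cases hc : PySem.List.pyGetD children i [] = []
    · rw [List.foldl_cons, if_pos hc, ih,
        show (i :: l).filter (fun j => !hasCh children j)
          = i :: l.filter (fun j => !hasCh children j) from by simp [hasCh, hc],
        List.foldl_cons]
      simp only [List.length_cons, Prod.mk.injEq]
      exact ⟨trivial, by push_cast; ring⟩
    · rw [List.foldl_cons, if_neg hc, ih,
        show (i :: l).filter (fun j => !hasCh children j)
          = l.filter (fun j => !hasCh children j) from by simp [hasCh, hc]]

theorem aLoop_eq (children : List (List Int)) (leaves : List Int) (n tsp C : Int)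
    (htot : ∀ m, aTotal children leaves n m = C * m) (hC : 0 ≤ C) (hS : C = 0 → 0 ≤ tsp) :
    ∀ (k : Nat) (l r : Int), (r - l).toNat = k → l ≤ r →
      aLoop children leaves n tsp l r
        = if C = 0 then r else max l (min r (PySem.Int.floordiv tsp C)) := by
  intro k
  induction k using Nat.strong_induction_on with
  | _ k ih =>
    intro l r hk hlr
    rw [aLoop]
    by_cases h1 : l < r
    · simp only [h1, dif_pos]
      have hb := PySem.Int.floordiv_two_mid_bounds (lo := l + 1) (hi := r) (by omega)
      rw [show l + 1 + r = l + r + 1 by ring] at hb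
      rw [htot]
      by_cases h2 : C * PySem.Int.floordiv (l + r + 1) 2 ≤ tsp
      · simp only [h2, if_pos]
        rw [ih (r - PySem.Int.floordiv (l + r + 1) 2).toNat (by omega) _ r rfl (by omega)]
        by_cases hC0 : C = 0
        · simp [hC0]
        · have hCpos : 0 < C := lt_of_le_of_ne hC (Ne.symm hC0)
          have hq : PySem.Int.floordiv (l + r + 1) 2 ≤ PySem.Int.floordiv tsp C :=
            (PySem.Int.le_floordiv_iff_mul_le hCpos).mpr (by rw [mul_comm]; exact h2)
          simp only [hC0, if_false]
          omega
      · simp only [h2, if_neg, if_false]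
        have hC0 : C ≠ 0 := by
          intro h0
          apply h2
          rw [h0, zero_mul]
          exact hS h0
        have hCpos : 0 < C := lt_of_le_of_ne hC (Ne.symm hC0)
        have hq : PySem.Int.floordiv tsp C < PySem.Int.floordiv (l + r + 1) 2 := by
          by_contra hq'
          exact h2 (by
            rw [mul_comm]
            exact (PySem.Int.le_floordiv_iff_mul_le hCpos).mp (by omega))
        rw [ih (PySem.Int.floordiv (l + r + 1) 2 - 1 - l).toNat (by omega) l _ rfl (by omega)]
        simp only [hC0, if_false]
        omega
    · simp only [h1, dif_neg, not_false_eq_true]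
      have hlr' : l = r := le_antisymm hlr (not_lt.mp h1)
      subst hlr'
      by_cases hC0 : C = 0
      · simp [hC0]
      · simp only [hC0, if_false]
        omega

theorem pass_fst (children : List (List Int)) :
    ∀ (order : List Int) (st : List Int) (t : Int),
      order.foldl (fun r node =>
          if PySem.List.pyGetD children node [] ≠ [] then
            PySem.List.pySetD r node (aSumChildren r (PySem.List.pyGetD children node []))
          else r) st
        = (order.foldl (passF children) (st, t)).1 := by
  intro order
  induction order with
  | nil => intro st t; rfl
  | cons node order ih =>
    intro st t
    simp only [List.foldl_cons, passF, aSumChildren]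
    by_cases hc : PySem.List.pyGetD children node [] = []
    · simp only [hc, ne_eq, not_true_eq_false, if_false]
      exact ih st t
    · simp only [hc, ne_eq, not_false_eq_true, if_true]
      exact ih _ _

theorem countdown_eq (children : List (List Int)) (n : Int) :
    (PySem.List.pyRange n 0 (-1)).filter (hasCh children)
      = ((PySem.List.pyRange 1 (n + 1) 1).filter (hasCh children)).reverse := by
  rw [show (PySem.List.pyRange n 0 (-1)) = (PySem.List.pyRange (0+1) (n+1) 1).reverse from
      PySem.List.pyRange_neg_one_eq_reverse n 0]
  rw [List.filter_reverse]
  norm_num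

theorem bDown_pass (children : List (List Int)) (n : Int) (st : List Int × Int) :
    bDown children n st
      = (((PySem.List.pyRange 1 (n + 1) 1).filter (hasCh children)).reverse).foldl
          (passF children) st := by
  unfold bDown
  rw [show (fun (uc : List Int × Int) node =>
      if PySem.List.pyGetD children node [] ≠ [] then
        (PySem.List.pySetD uc.1 node
            ((PySem.List.pyGetD children node []).foldl
              (fun a c => a + PySem.List.pyGetD uc.1 c 0) 0),
         uc.2 + (PySem.List.pyGetD children node []).foldl
              (fun a c => a + PySem.List.pyGetD uc.1 c 0) 0)
      else uc) = passF children from rfl]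
  rw [pass_filter children _ st, countdown_eq]

theorem bInit_eq (children : List (List Int)) (n : Int) :
    bInit children n
      = ((aLeaves children n).foldl (fun u i => PySem.List.pySetD u i 1)
          (List.replicate (n + 1).toNat (0 : Int)),
         ((aLeaves children n).length : Int)) := by
  unfold bInit
  rw [initB_gen children (PySem.List.pyRange 1 (n + 1) 1) (List.replicate (n + 1).toNat 0) 0,
    leaves_eq]
  simp

theorem aTotal_scale (children : List (List Int)) (n m : Int) :
    aTotal children (aLeaves children n) n m
      = (bDown children n (bInit children n)).2 * m := by
  unfold aTotal
  dsimp only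
  rw [PySem.List.pyRepeat_singleton]
  rw [show ((((aLeaves children n).length : Int)).toNat) = (aLeaves children n).length by simp]
  have hinit : (PySem.List.enumerate (aLeaves children n)).foldl
      (fun nv p => PySem.List.pySetD nv p.2
        (PySem.List.pyGetD (List.replicate (aLeaves children n).length m) p.1 0))
      (List.replicate (n + 1).toNat (0 : Int))
      = (aLeaves children n).foldl (fun nv l => PySem.List.pySetD nv l m)
          (List.replicate (n + 1).toNat (0 : Int)) := by
    have := initA_gen m (aLeaves children n).length (aLeaves children n) 0
      (List.replicate (n + 1).toNat (0 : Int)) (by omega)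
    simpa using this
  rw [hinit]
  have hbody : (fun (st : List Int × Int) node =>
      if PySem.List.pyGetD children node [] ≠ [] then
        (PySem.List.pySetD st.1 node (aSumChildren st.1 (PySem.List.pyGetD children node [])),
         st.2 + aSumChildren st.1 (PySem.List.pyGetD children node []))
      else st) = passF children := by
    funext st node
    simp only [passF, aSumChildren]
  rw [hbody]
  rw [show aNonLeavesDesc (aLeaves children n) n
      = ((PySem.List.pyRange 1 (n + 1) 1).filter (hasCh children)).reverse by
    rw [leaves_eq] at *
    exact orderA_eq children n]
  have hsum : (List.replicate (aLeaves children n).length m).sum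
      = ((aLeaves children n).length : Int) * m := by
    rw [List.sum_replicate]
    simp [nsmul_eq_mul]
  rw [hsum]
  have hinitm : (aLeaves children n).foldl (fun nv l => PySem.List.pySetD nv l m)
      (List.replicate (n + 1).toNat (0 : Int))
      = ((aLeaves children n).foldl (fun nv l => PySem.List.pySetD nv l 1)
          (List.replicate (n + 1).toNat (0 : Int))).map (· * m) := by
    rw [← init_scale]
    congr 1
    rw [List.map_replicate]
    simp
  rw [hinitm]
  rw [bDown_pass, bInit_eq]
  have := pass_scale children m
    (((PySem.List.pyRange 1 (n + 1) 1).filter (hasCh children)).reverse)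
    ((aLeaves children n).foldl (fun nv l => PySem.List.pySetD nv l 1)
      (List.replicate (n + 1).toNat (0 : Int)))
    (((aLeaves children n).length : Int))
  rw [this]


theorem solution_spec : Claim_equal_solution := by
  intro tsp skills _hdom _hpre
  unfold Spec_solution solution solution_alt
  dsimp only
  rw [build_fst]
  set n := pvMaxNode skills with hn
  set ch := bChildren n skills with hch
  set leaves := aLeaves ch n with hleaves
  set K := (n + 1).toNat with hK
  set LA := aLoop ch leaves n tsp 1 tsp with hLAdef
  set st := bDown ch n (bInit ch n) with hst
  have horder : aNonLeavesDesc leaves n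
      = ((PySem.List.pyRange 1 (n + 1) 1).filter (hasCh ch)).reverse := by
    rw [hleaves, leaves_eq]
    exact orderA_eq ch n
  rw [pass_fst ch _ _ ((leaves.length : Int) * LA), horder]
  have hinitLA : leaves.foldl (fun r leaf => PySem.List.pySetD r leaf LA)
      (List.replicate K (0 : Int))
      = (leaves.foldl (fun nv l => PySem.List.pySetD nv l 1)
          (List.replicate K (0 : Int))).map (· * LA) := by
    rw [← init_scale]
    congr 1
    simp [List.map_replicate]
  rw [hinitLA, pass_scale]
  have hstalt : st = (((PySem.List.pyRange 1 (n + 1) 1).filter (hasCh ch)).reverse).foldl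
      (passF ch)
      (leaves.foldl (fun nv l => PySem.List.pySetD nv l 1) (List.replicate K (0 : Int)),
       ((leaves.length : Int))) := by
    rw [hst, bDown_pass, bInit_eq, ← hleaves, ← hK]
  rw [← hstalt]
  have htot : ∀ m, aTotal ch leaves n m = st.2 * m := by
    intro m
    rw [hleaves, hst]
    exact aTotal_scale ch n m
  have hnn : ((leaves.length : Int)) ≤ st.2 ∧ (∀ x ∈ st.1, 0 ≤ x) := by
    rw [hstalt]
    exact pass_nonneg ch _ _
      (init1_nonneg leaves (List.replicate K 0) (by intro x hx; simp_all))
  have hC : 0 ≤ st.2 := le_trans (by positivity) hnn.1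
  have hsl : ∀ (xs : List Int), PySem.List.slice xs (some 1) none = xs.drop 1 := by
    intro xs
    have h := PySem.List.slice_from (xs := xs) (a := 1) (by norm_num)
    simpa using h
  dsimp only
  rw [hsl, hsl, ← List.map_drop]
  by_cases hts : 1 < tsp
  · by_cases hC0 : st.2 = 0
    · have hlnil : leaves = [] := by
        have h1 := hnn.1
        have : leaves.length = 0 := by omega
        exact List.eq_nil_of_length_eq_zero this
      have hu : st.1 = List.replicate K (0 : Int) := by
        rw [hstalt, hlnil]
        simp only [List.foldl_nil, List.length_nil, Nat.cast_zero]
        rw [zero_pass]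
      rw [hu]
      simp [List.map_drop, List.map_replicate, List.drop_replicate]
    · have hCpos : 0 < st.2 := lt_of_le_of_ne hC (Ne.symm hC0)
      have hLA : LA = max 1 (min tsp (PySem.Int.floordiv tsp st.2)) := by
        have := aLoop_eq ch leaves n tsp st.2 htot hC (fun h => absurd h hC0)
          (tsp - 1).toNat 1 tsp rfl (by omega)
        rw [hLAdef, this]
        simp [hC0]
      have hqle : PySem.Int.floordiv tsp st.2 ≤ tsp := by
        rw [PySem.Int.floordiv_eq_ediv_of_pos hCpos]
        exact Int.ediv_le_self _ (by omega)
      have hLA' : LA = max 1 (PySem.Int.floordiv tsp st.2) := by omega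
      rw [if_pos ⟨hts, hCpos⟩, hLA']
  · have hLA1 : LA = 1 := by
      rw [hLAdef, aLoop]
      simp [hts]
    have hlv : (if tsp > 1 ∧ st.2 > 0 then max 1 (PySem.Int.floordiv tsp st.2) else 1) = 1 := by
      simp [hts]
    rw [hLA1, hlv]
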